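-- pv_equiv track=rewrite | github.com/mariocervera/LeetCode | 3310_remove_methods_from_project.py | exists_node_invoking_suspicious_node
-- ===== SOURCE A (Python) =====
-- def exists_node_invoking_suspicious_node(graph, suspicious_nodes):
--     visited = set()
--
--     def dfs(node):
--         if node in suspicious_nodes:
--             return True
--         if node in visited:
--             return False
--         visited.add(node)
--         for adj in graph[node]:
--             if dfs(adj):
--                 return True
--         return False
--
--     for i in range(len(graph)):
--         if i not in suspicious_nodes and dfs(i):
--             return True
--     return False
-- ===== SOURCE B (Python) =====
-- def exists_node_invoking_suspicious_node(graph, suspicious_nodes):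
--     sus = set(suspicious_nodes)
--     return any(u not in sus and any(v in sus for v in adj)
--                for u, adj in enumerate(graph))
-- ===== Notes on version B (the rewrite author's own statement) =====
-- stated objective: simpler
-- what changed: Replaces the recursive DFS with shared memoised visited-set by a single flat scan: the answer is true iff some in-range non-suspicious node has a direct edge to a suspicious node (any first suspicious node on a path has a non-suspicious predecessor), checked with one set lookup per edge.
-- outside the precondition, e.g. on exists_node_invoking_suspicious_node([[-1], [7]], {1, 7}): A returns True, B returns False; on exists_node_invoking_suspicious_node([[], [9]], {1}): A returns False, B returns False
import Mathlib
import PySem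

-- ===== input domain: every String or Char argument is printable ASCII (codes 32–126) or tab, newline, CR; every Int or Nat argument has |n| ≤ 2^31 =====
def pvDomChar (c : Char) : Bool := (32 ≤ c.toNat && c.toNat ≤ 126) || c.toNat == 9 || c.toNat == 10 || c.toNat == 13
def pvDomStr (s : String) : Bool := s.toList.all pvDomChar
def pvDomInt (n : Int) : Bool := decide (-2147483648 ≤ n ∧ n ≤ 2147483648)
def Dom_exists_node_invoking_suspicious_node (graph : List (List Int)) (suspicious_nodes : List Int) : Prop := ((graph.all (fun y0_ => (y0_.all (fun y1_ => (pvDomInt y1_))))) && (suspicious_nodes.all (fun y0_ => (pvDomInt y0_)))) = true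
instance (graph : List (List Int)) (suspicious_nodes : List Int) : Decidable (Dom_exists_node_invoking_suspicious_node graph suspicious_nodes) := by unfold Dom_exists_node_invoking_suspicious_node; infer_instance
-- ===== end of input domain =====

-- B replaces A's recursive memoised DFS by a single flat edge scan (the answer is true iff some
-- in-range non-suspicious node has a direct edge to a suspicious node); return-value equivalence
-- is proved on well-formed graphs (Pre_ below).

-- ===== PORT A =====
-- 'for adj in graph[node]: if dfs(adj): return True' — early-exit loop threading the shared visited set
def dfsNeighbors (step : PySem.Set Int → Int → Bool × PySem.Set Int) :
    PySem.Set Int → List Int → Bool × PySem.Set Int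
  | vis, [] => (false, vis)
  | vis, adj :: rest =>
    match step vis adj with
    | (true, vis') => (true, vis')
    | (false, vis') => dfsNeighbors step vis' rest

-- the inner 'def dfs(node)'; fuel makes the recursion structural (fuel graph.length+1 is never
-- exhausted under Pre_: each recursive step adds a fresh in-range node to visited)
def dfsA (graph : List (List Int)) (S : List Int) :
    Nat → PySem.Set Int → Int → Bool × PySem.Set Int
  | fuel, vis, node =>
    if S.contains node then (true, vis)
    else if PySem.Set.contains vis node then (false, vis)
    else
      match fuel with
      | 0 => (false, vis)
      | f + 1 =>
        dfsNeighbors (dfsA graph S f) (PySem.Set.add vis node)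
          ((PySem.List.pyGet? graph node).getD [])

-- 'for i in range(len(graph)): if i not in suspicious_nodes and dfs(i): return True'
def loopA (graph : List (List Int)) (S : List Int) (fuel : Nat) :
    List Int → PySem.Set Int → Bool
  | [], _ => false
  | i :: rest, vis =>
    if S.contains i then loopA graph S fuel rest vis
    else
      match dfsA graph S fuel vis i with
      | (true, _) => true
      | (false, vis') => loopA graph S fuel rest vis'

def exists_node_invoking_suspicious_node (graph : List (List Int)) (suspicious_nodes : List Int) : Bool :=
  loopA graph suspicious_nodes (graph.length + 1)
    (PySem.List.pyRange 0 graph.length 1) PySem.Set.empty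

-- ===== PORT B =====
def exists_node_invoking_suspicious_node_alt (graph : List (List Int)) (suspicious_nodes : List Int) : Bool :=
  let sus : PySem.Set Int := PySem.Set.ofList suspicious_nodes
  (PySem.List.enumerate graph).any (fun p =>
    !(PySem.Set.contains sus p.1) && p.2.any (fun v => PySem.Set.contains sus v))

-- ===== PRECONDITION & SPEC =====
-- Pre_ admits exactly the well-formed graphs: every neighbour is either a valid index or a
-- suspicious id. Outside it A's forward DFS may raise IndexError on a reached out-of-range
-- neighbour, and a reached negative neighbour silently wraps around (Python negative indexing) —
-- an accident of A's implementation that B does not reproduce.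
def Pre_exists_node_invoking_suspicious_node (graph : List (List Int)) (suspicious_nodes : List Int) : Prop :=
  ∀ row ∈ graph, ∀ v ∈ row, (0 ≤ v ∧ v < (graph.length : Int)) ∨ v ∈ suspicious_nodes
instance (graph : List (List Int)) (suspicious_nodes : List Int) : Decidable (Pre_exists_node_invoking_suspicious_node graph suspicious_nodes) := by unfold Pre_exists_node_invoking_suspicious_node; infer_instance

def pvWitness_exists_node_invoking_suspicious_node : List (List Int) × List Int := ([[1], [0]], [])

def Spec_exists_node_invoking_suspicious_node (graph : List (List Int)) (suspicious_nodes : List Int) (out : Bool) : Prop := out = exists_node_invoking_suspicious_node_alt graph suspicious_nodes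
instance (graph : List (List Int)) (suspicious_nodes : List Int) (out : Bool) : Decidable (Spec_exists_node_invoking_suspicious_node graph suspicious_nodes out) := by unfold Spec_exists_node_invoking_suspicious_node; infer_instance

-- ===== CLAIM (what is proved, stated in full; the proofs are below) =====
def Claim_equal_exists_node_invoking_suspicious_node : Prop := ∀ (graph : List (List Int)) (suspicious_nodes : List Int), Dom_exists_node_invoking_suspicious_node graph suspicious_nodes → Pre_exists_node_invoking_suspicious_node graph suspicious_nodes → Spec_exists_node_invoking_suspicious_node graph suspicious_nodes (exists_node_invoking_suspicious_node graph suspicious_nodes)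

-- ===== LEMMAS AND PROOFS =====

-- B returns true iff some in-range non-suspicious node has an edge to a suspicious node
lemma alt_iff (graph : List (List Int)) (S : List Int) :
    exists_node_invoking_suspicious_node_alt graph S = true ↔
      ∃ (k : Nat) (h : k < graph.length),
        (k : Int) ∉ S ∧ ∃ v ∈ graph[k], v ∈ S := by
  have hciff : ∀ x : Int, (PySem.Set.ofList S).contains x = true ↔ x ∈ S :=
    fun x => (PySem.Set.contains_iff _ _).trans (PySem.Set.mem_ofList _ _)
  unfold exists_node_invoking_suspicious_node_alt
  simp only [List.any_eq_true, Bool.and_eq_true, Bool.not_eq_true',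
    PySem.List.mem_enumerate_iff]
  constructor
  · rintro ⟨p, ⟨k, hk, rfl⟩, hns, v, hv, hvS⟩
    refine ⟨k, hk, fun hm => ?_, v, hv, (hciff v).1 hvS⟩
    simp only [zero_add] at hns
    simp at hns
    exact hns hm
  · rintro ⟨k, hk, hns, v, hv, hvS⟩
    refine ⟨((0:Int) + k, graph[k]), ⟨k, hk, rfl⟩, ?_, v, hv, (hciff v).2 hvS⟩
    simp only [zero_add]
    exact Bool.eq_false_iff.2 (fun hc => hns ((hciff _).1 hc))

-- a suspicious node returns (True, vis) immediately, any fuel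
lemma dfsA_of_mem_S (graph : List (List Int)) (S : List Int) (f : Nat)
    (vis : PySem.Set Int) (node : Int) (h : node ∈ S) :
    dfsA graph S f vis node = (true, vis) := by
  cases f <;> simp [dfsA, h]

-- the neighbour loop returns true as soon as some neighbour is suspicious
lemma foldTrue (S : List Int) (step : PySem.Set Int → Int → Bool × PySem.Set Int)
    (hstep : ∀ vis v, v ∈ S → step vis v = (true, vis))
    (l : List Int) (vis : PySem.Set Int) (hex : ∃ v ∈ l, v ∈ S) :
    (dfsNeighbors step vis l).1 = true := by
  induction l generalizing vis with
  | nil => obtain ⟨v, hv, _⟩ := hex; simp at hv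
  | cons a rest ih =>
    obtain ⟨v, hv, hvS⟩ := hex
    rcases hs : step vis a with ⟨r1, vis1⟩
    simp only [dfsNeighbors]
    rw [hs]
    cases r1 with
    | true => rfl
    | false =>
      rcases List.mem_cons.1 hv with rfl | hvrest
      · rw [hstep vis v hvS] at hs; simp at hs
      · exact ih vis1 ⟨v, hvrest, hvS⟩

-- if the neighbour loop ever adds u to visited, it (or a step) returned true … propagated from step
lemma foldVis (u : Int) (step : PySem.Set Int → Int → Bool × PySem.Set Int)
    (hstep : ∀ vis v r vis', step vis v = (r, vis') → u ∉ vis → u ∈ vis' → r = true) :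
    ∀ (l : List Int) (vis : PySem.Set Int) (r : Bool) (vis' : PySem.Set Int),
      dfsNeighbors step vis l = (r, vis') → u ∉ vis → u ∈ vis' → r = true := by
  intro l
  induction l with
  | nil =>
    intro vis r vis' heq hnin hin
    simp only [dfsNeighbors] at heq
    injection heq with h1 h2
    subst h2; exact absurd hin hnin
  | cons a rest ih =>
    intro vis r vis' heq hnin hin
    rcases hs : step vis a with ⟨r1, vis1⟩
    simp only [dfsNeighbors] at heq
    rw [hs] at heq
    cases r1 with
    | true => injection heq with h1 _; exact h1.symm
    | false =>
      by_cases hin1 : u ∈ vis1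
      · exact absurd (hstep vis a false vis1 hs hnin hin1) (by simp)
      · exact ih vis1 r vis' heq hin1 hin

-- key DFS invariant: if u (non-suspicious, with a suspicious neighbour) gets visited, the call
-- that visited it found that neighbour and the whole recursion returned true
lemma dfsA_vis (graph : List (List Int)) (S : List Int) (u : Int)
    (hu : ∃ v ∈ (PySem.List.pyGet? graph u).getD [], v ∈ S) (hus : u ∉ S) :
    ∀ (f : Nat) (vis : PySem.Set Int) (node : Int) (r : Bool) (vis' : PySem.Set Int),
      dfsA graph S f vis node = (r, vis') → u ∉ vis → u ∈ vis' → r = true := by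
  intro f
  induction f with
  | zero =>
    intro vis node r vis' heq hnin hin
    simp only [dfsA] at heq
    split_ifs at heq with h1 h2
    · injection heq with h _; exact h.symm
    · injection heq with _ h; subst h; exact absurd hin hnin
    · injection heq with _ h; subst h; exact absurd hin hnin
  | succ f ih =>
    intro vis node r vis' heq hnin hin
    simp only [dfsA] at heq
    split_ifs at heq with h1 h2
    · injection heq with h _; exact h.symm
    · injection heq with _ h; subst h; exact absurd hin hnin
    · by_cases hnu : node = u
      · subst hnu
        have := foldTrue S (dfsA graph S f)
          (fun vis v hv => dfsA_of_mem_S graph S f vis v hv)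
          ((PySem.List.pyGet? graph node).getD []) (PySem.Set.add vis node) hu
        rw [heq] at this
        exact this
      · refine foldVis u (dfsA graph S f) (ih) _ _ _ _ heq ?_ hin
        intro hmem
        rcases (PySem.Set.mem_add _ _ _).1 hmem with h | h
        · exact hnin h
        · exact hnu h.symm

lemma dfsA_direct_true (graph : List (List Int)) (S : List Int) (f : Nat)
    (vis : PySem.Set Int) (node : Int) (_h1 : node ∉ S) (h2 : node ∉ vis)
    (hex : ∃ v ∈ (PySem.List.pyGet? graph node).getD [], v ∈ S) :
    (dfsA graph S (f + 1) vis node).1 = true := by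
  simp only [dfsA]
  split_ifs with hc1 hc2
  · rfl
  · exact absurd ((PySem.Set.contains_iff _ _).1 hc2) h2
  · exact foldTrue S (dfsA graph S f)
      (fun vis v hv => dfsA_of_mem_S graph S f vis v hv) _ _ hex

-- completeness of A's outer loop: an unvisited witness u still in the index list forces true
lemma loopA_complete (graph : List (List Int)) (S : List Int) (u : Int)
    (hu : ∃ v ∈ (PySem.List.pyGet? graph u).getD [], v ∈ S) (hus : u ∉ S) :
    ∀ (idxs : List Int) (vis : PySem.Set Int), u ∈ idxs → u ∉ vis →
      loopA graph S (graph.length + 1) idxs vis = true := by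
  intro idxs
  induction idxs with
  | nil => intro vis hmem _; simp at hmem
  | cons i rest ih =>
    intro vis hmem hnin
    simp only [loopA]
    split_ifs with hi
    · have hur : u ∈ rest := by
        rcases List.mem_cons.1 hmem with rfl | h
        · exact absurd (by simpa using hi) hus
        · exact h
      exact ih vis hur hnin
    · rcases hd : dfsA graph S (graph.length + 1) vis i with ⟨r, vis'⟩
      cases r with
      | true => rfl
      | false =>
        by_cases hiu : i = u
        · subst hiu
          have := dfsA_direct_true graph S graph.length vis i hus hnin hu
          rw [hd] at this
          exact absurd this (by simp)
        · by_cases hvin : u ∈ vis'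
          · exact absurd (dfsA_vis graph S u hu hus _ vis i false vis' hd hnin hvin) (by simp)
          · have hur : u ∈ rest := by
              rcases List.mem_cons.1 hmem with rfl | h
              · exact absurd rfl hiu
              · exact h
            exact ih vis' hur hvin

-- soundness scaffolding: if the neighbour loop returns true, some step returned true
lemma foldSound (step : PySem.Set Int → Int → Bool × PySem.Set Int) (C : Prop) :
    ∀ (l : List Int) (vis : PySem.Set Int),
      (∀ vis₀ v vis₁, v ∈ l → step vis₀ v = (true, vis₁) → C) →
      (dfsNeighbors step vis l).1 = true → C := by
  intro l
  induction l with
  | nil => intro vis _ hfold; simp [dfsNeighbors] at hfold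
  | cons a rest ih =>
    intro vis h hfold
    rcases hs : step vis a with ⟨r1, vis1⟩
    simp only [dfsNeighbors] at hfold
    rw [hs] at hfold
    cases r1 with
    | true => exact h vis a vis1 (List.mem_cons_self) hs
    | false =>
      exact ih vis1 (fun v0 v v1 hv => h v0 v v1 (List.mem_cons_of_mem a hv)) hfold

-- soundness of the DFS: a true answer exhibits an in-range non-suspicious node with a
-- suspicious neighbour, i.e. B also answers true
lemma dfsA_sound (graph : List (List Int)) (S : List Int)
    (hPre : Pre_exists_node_invoking_suspicious_node graph S) :
    ∀ (f : Nat) (vis : PySem.Set Int) (node : Int) (vis' : PySem.Set Int),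
      node ∉ S → 0 ≤ node → node < (graph.length : Int) →
      dfsA graph S f vis node = (true, vis') →
      exists_node_invoking_suspicious_node_alt graph S = true := by
  intro f
  induction f with
  | zero =>
    intro vis node vis' hnS h0 hlt heq
    simp only [dfsA] at heq
    split_ifs at heq with h1 h2
    · exact absurd (by simpa using h1) hnS
    · simp at heq
    · simp at heq
  | succ f ih =>
    intro vis node vis' hnS h0 hlt heq
    simp only [dfsA] at heq
    split_ifs at heq with h1 h2
    · exact absurd (by simpa using h1) hnS
    · simp at heq
    · have hklt : node.toNat < graph.length := by omega
      have hget : PySem.List.pyGet? graph node = some graph[node.toNat] :=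
        PySem.List.pyGet?_eq_some_getElem _ h0 hlt
      have hrow : (PySem.List.pyGet? graph node).getD [] = graph[node.toNat] := by
        rw [hget]; rfl
      refine foldSound (dfsA graph S f) _ _ (PySem.Set.add vis node) ?_ (by rw [heq])
      intro vis0 v vis1 hv hstep_eq
      rw [hrow] at hv
      by_cases hvS : v ∈ S
      · refine (alt_iff graph S).2 ⟨node.toNat, hklt, ?_, v, hv, hvS⟩
        rwa [Int.toNat_of_nonneg h0]
      · rcases hPre graph[node.toNat] (List.getElem_mem hklt) v hv with ⟨hge, hlt'⟩ | hvS'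
        · exact ih vis0 v vis1 hvS hge hlt' hstep_eq
        · exact absurd hvS' hvS

lemma loopA_sound (graph : List (List Int)) (S : List Int)
    (hPre : Pre_exists_node_invoking_suspicious_node graph S) :
    ∀ (idxs : List Int) (vis : PySem.Set Int),
      (∀ i ∈ idxs, 0 ≤ i ∧ i < (graph.length : Int)) →
      loopA graph S (graph.length + 1) idxs vis = true →
      exists_node_invoking_suspicious_node_alt graph S = true := by
  intro idxs
  induction idxs with
  | nil => intro vis _ h; simp [loopA] at h
  | cons i rest ih =>
    intro vis hall h
    simp only [loopA] at h
    split_ifs at h with hi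
    · exact ih vis (fun j hj => hall j (List.mem_cons_of_mem i hj)) h
    · rcases hd : dfsA graph S (graph.length + 1) vis i with ⟨r, vis'⟩
      rw [hd] at h
      cases r with
      | true =>
        obtain ⟨hge, hlt⟩ := hall i List.mem_cons_self
        exact dfsA_sound graph S hPre _ vis i vis'
          (fun hm => hi (by simpa using hm)) hge hlt hd
      | false =>
        exact ih vis' (fun j hj => hall j (List.mem_cons_of_mem i hj)) h

-- ===== VERDICT (by name: the statement is the Claim_ definition above) =====
theorem exists_node_invoking_suspicious_node_spec : Claim_equal_exists_node_invoking_suspicious_node := by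
  intro graph S _ hPre
  unfold Spec_exists_node_invoking_suspicious_node
  cases halt : exists_node_invoking_suspicious_node_alt graph S with
  | true =>
    obtain ⟨k, hk, hks, v, hv, hvS⟩ := (alt_iff graph S).1 halt
    have hrange : (0:Int) ≤ (k:Int) ∧ (k:Int) < (graph.length : Int) := by
      constructor <;> [positivity; exact_mod_cast hk]
    have hget : PySem.List.pyGet? graph (k : Int) = some graph[k] := by
      rw [PySem.List.pyGet?_natCast]
      exact List.getElem?_eq_getElem hk
    apply (loopA_complete graph S (k:Int) ⟨v, by simp [hget, hv], hvS⟩ hks _ _ ?_ ?_)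
    · exact (PySem.List.mem_pyRange_one).2 ⟨hrange.1, hrange.2⟩
    · simp [PySem.Set.empty]
  | false =>
    cases hA : exists_node_invoking_suspicious_node graph S with
    | false => rfl
    | true =>
      have := loopA_sound graph S hPre (PySem.List.pyRange 0 graph.length 1) PySem.Set.empty
        (fun i hi => by
          have := (PySem.List.mem_pyRange_one).1 hi
          exact ⟨this.1, this.2⟩) hA
      rw [halt] at this; exact this.symm
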